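-- pv_equiv track=rewrite | github.com/yidatao/LeetCode | interleaving-string.py | getValid
-- ===== SOURCE A (Python) =====
-- def getValid(l):
--     res = []
--     for i in range(len(l)):
--         sublist = l[i]
--         if i == 0:
--             for sl in sublist:
--                 res.append([sl])
--         else:
--             tmp = list(res)
--             for sr in tmp:
--                 for sl in sublist:
--                     #valid if it's increasing
--                     if sl > sr[-1]:
--                         res.append(sr + [sl])
--                     else:
--                         break
--     #return all valid indices
--     return [x for x in res if len(x) == len(l)]
-- ===== SOURCE B (Python) =====
-- def getValid(l):
--     if not l:
--         return []
--     res = []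
--     def dfs(idx, seq):
--         if idx == len(l):
--             res.append(seq)
--             return
--         for x in l[idx]:
--             if seq and x <= seq[-1]:
--                 break
--             dfs(idx + 1, seq + [x])
--     dfs(0, [])
--     return res
-- ===== Notes on version B (the rewrite author's own statement) =====
-- stated objective: simpler
-- what changed: Replaced A's level-by-level accumulation of all partial sequences into one shared list (followed by a final length filter) with a direct recursive DFS that extends one selection per sublist and only ever emits full-length results; no junk partials are ever created or filtered.
import Mathlib
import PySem

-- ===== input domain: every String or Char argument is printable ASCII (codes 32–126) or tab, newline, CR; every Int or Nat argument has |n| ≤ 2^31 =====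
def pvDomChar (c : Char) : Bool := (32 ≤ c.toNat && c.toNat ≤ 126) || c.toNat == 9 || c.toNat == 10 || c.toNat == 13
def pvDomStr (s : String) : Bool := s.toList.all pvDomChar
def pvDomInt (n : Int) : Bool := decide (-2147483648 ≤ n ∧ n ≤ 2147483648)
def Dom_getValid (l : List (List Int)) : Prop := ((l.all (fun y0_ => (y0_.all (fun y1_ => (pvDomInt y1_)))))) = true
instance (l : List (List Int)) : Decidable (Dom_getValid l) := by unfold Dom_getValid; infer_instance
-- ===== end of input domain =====

-- B replaces A's shared growing list of partial sequences (+ final length filter) with a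
-- direct DFS emitting only full-length selections; objective: simpler.

-- ===== PORT A =====
-- inner loop 'for sl in sublist: if sl > sr[-1]: res.append(sr+[sl]) else: break', r is res.
-- sr[-1] is ported as pyGetD sr (-1) 0: exact because every element of res is nonempty
-- (each is created as [sl] or sr ++ [sl]), so sr[-1] never raises.
def innerA (sr : List Int) (r : List (List Int)) : List Int → List (List Int)
  | [] => r
  | sl :: rest =>
      if PySem.List.pyGetD sr (-1) 0 < sl then innerA sr (r ++ [sr ++ [sl]]) rest else r

-- one iteration of 'for i in range(len(l))'; i < len(l) in the loop, so pyGetD is exact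
def stepA (l : List (List Int)) (res : List (List Int)) (i : Int) : List (List Int) :=
  let sublist := PySem.List.pyGetD l i []
  if i == 0 then
    sublist.foldl (fun r sl => r ++ [[sl]]) res
  else
    -- tmp = list(res); iterate over the snapshot tmp while appending to res
    res.foldl (fun r sr => innerA sr r sublist) res

def getValid (l : List (List Int)) : List (List Int) :=
  ((PySem.List.pyRange 0 (l.length : Int) 1).foldl (stepA l) []).filter
    (fun x => x.length == l.length)

-- ===== PORT B =====
-- dfs(idx, seq): here the remaining sublists l[idx:] are carried as the list argument;
-- dfsLoopB is the 'for x in l[idx]' loop with its break.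
mutual
def dfsB (seq : List Int) : List (List Int) → List (List Int)
  | [] => [seq]
  | sub :: rest => dfsLoopB seq rest sub
termination_by subs => (subs.length, 0)

def dfsLoopB (seq : List Int) (rest : List (List Int)) : List Int → List (List Int)
  | [] => []
  | x :: xs =>
      if seq ≠ [] ∧ x ≤ PySem.List.pyGetD seq (-1) 0 then []  -- break
      else dfsB (seq ++ [x]) rest ++ dfsLoopB seq rest xs
termination_by xs => (rest.length, xs.length + 1)
end

def getValid_alt (l : List (List Int)) : List (List Int) :=
  if l = [] then [] else dfsB [] l

-- ===== PRECONDITION & SPEC =====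
def Spec_getValid (l : List (List Int)) (out : List (List Int)) : Prop := out = getValid_alt l
instance (l : List (List Int)) (out : List (List Int)) : Decidable (Spec_getValid l out) := by unfold Spec_getValid; infer_instance

-- ===== CLAIM (what is proved, stated in full; the proofs are below) =====
def Claim_equal_getValid : Prop := ∀ (l : List (List Int)), Dom_getValid l → Spec_getValid l (getValid l)

-- ===== LEMMAS AND PROOFS =====

-- the common one-level extension: keep the maximal strictly-increasing prefix of sub
def condB (seq : List Int) : Int → Bool :=
  fun x => decide ¬(seq ≠ [] ∧ x ≤ PySem.List.pyGetD seq (-1) 0)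

def extB (sub : List Int) (sr : List Int) : List (List Int) :=
  (sub.takeWhile (condB sr)).map (fun x => sr ++ [x])

def stepB (acc : List (List Int)) (sub : List Int) : List (List Int) :=
  acc.flatMap (extB sub)

theorem condB_nonempty (seq : List Int) (h : seq ≠ []) :
    condB seq = fun x => decide (PySem.List.pyGetD seq (-1) 0 < x) := by
  funext x
  simp [condB, h, not_le]

theorem condB_nil : condB [] = fun _ => true := by
  funext x; simp [condB]

theorem takeWhile_true (xs : List Int) : xs.takeWhile (fun _ => true) = xs := by
  induction xs with
  | nil => rfl
  | cons a t ih => simp [List.takeWhile, ih]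

theorem innerA_eq (sr : List Int) (sub : List Int) (r : List (List Int)) :
    innerA sr r sub =
      r ++ (sub.takeWhile (fun x => decide (PySem.List.pyGetD sr (-1) 0 < x))).map
        (fun x => sr ++ [x]) := by
  induction sub generalizing r with
  | nil => simp [innerA]
  | cons a t ih =>
      by_cases h : PySem.List.pyGetD sr (-1) 0 < a
      · simp [innerA, h, ih]
      · simp [innerA, h]

theorem dfsLoopB_eq (seq : List Int) (rest : List (List Int)) (sub : List Int) :
    dfsLoopB seq rest sub = (sub.takeWhile (condB seq)).flatMap (fun x => dfsB (seq ++ [x]) rest) := by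
  induction sub with
  | nil => simp [dfsLoopB]
  | cons a t ih =>
      by_cases h : seq ≠ [] ∧ a ≤ PySem.List.pyGetD seq (-1) 0
      · simp [dfsLoopB, h, condB]
      · simp [dfsLoopB, h, ih, condB]

theorem foldl_stepB (subs : List (List Int)) :
    ∀ xs : List (List Int), subs.foldl stepB xs = xs.flatMap (fun s => dfsB s subs) := by
  induction subs with
  | nil => intro xs; simp [dfsB]
  | cons sub rest ih =>
      intro xs
      have h1 : (sub :: rest).foldl stepB xs = rest.foldl stepB (stepB xs sub) := rfl
      rw [h1, ih]
      simp only [stepB, List.flatMap_assoc]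
      apply List.flatMap_congr
      intro s _
      simp [dfsB, dfsLoopB_eq, extB, List.flatMap_map]

theorem dfsB_eq (seq : List Int) (subs : List (List Int)) :
    dfsB seq subs = subs.foldl stepB [seq] := by
  rw [foldl_stepB]
  simp

theorem length_foldl_stepB (subs : List (List Int)) :
    ∀ (xs : List (List Int)) (m : Nat), (∀ y ∈ xs, y.length = m) →
      ∀ x ∈ subs.foldl stepB xs, x.length = m + subs.length := by
  induction subs with
  | nil => intro xs m hm x hx; simpa using hm x hx
  | cons sub rest ih =>
      intro xs m hm x hx
      have h1 : (sub :: rest).foldl stepB xs = rest.foldl stepB (stepB xs sub) := rfl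
      rw [h1] at hx
      have hstep : ∀ y ∈ stepB xs sub, y.length = m + 1 := by
        intro y hy
        simp only [stepB, List.mem_flatMap, extB, List.mem_map] at hy
        obtain ⟨sr, hsr, x', _, rfl⟩ := hy
        simp [hm sr hsr]
      have := ih (stepB xs sub) (m + 1) hstep x hx
      simpa [Nat.add_comm, Nat.add_assoc, Nat.add_left_comm] using this

theorem filter_flatMap_len (xs : List (List Int)) (f : List Int → List (List Int)) (k : Nat)
    (hf : ∀ sr x, x ∈ f sr → x.length = sr.length + 1) :
    (xs.flatMap f).filter (fun x => x.length == k + 1) =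
      (xs.filter (fun x => x.length == k)).flatMap f := by
  induction xs with
  | nil => simp
  | cons a t ih =>
      simp only [List.flatMap_cons, List.filter_append, ih, List.filter_cons]
      by_cases h : a.length = k
      · have : (f a).filter (fun x => x.length == k + 1) = f a :=
          List.filter_eq_self.mpr (by intro x hx; simp [hf a x hx, h])
        simp [this, h]
      · have : (f a).filter (fun x => x.length == k + 1) = [] :=
          List.filter_eq_nil_iff.mpr (by intro x hx; simp [hf a x hx]; omega)
        simp [this, h]

-- A's loop state after the first k iterations
def RA (l : List (List Int)) (k : Nat) : List (List Int) :=
  (List.range k).foldl (fun r kk => stepA l r (kk : Int)) []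

theorem RA_succ (l : List (List Int)) (k : Nat) :
    RA l (k + 1) = stepA l (RA l k) (k : Int) := by
  simp [RA, List.range_succ]

theorem invA (l : List (List Int)) (k : Nat) (hk1 : 1 ≤ k) (hkn : k ≤ l.length) :
    (∀ x ∈ RA l k, 1 ≤ x.length ∧ x.length ≤ k) ∧
      (RA l k).filter (fun x => x.length == k) = (l.take k).foldl stepB [[]] := by
  induction k, hk1 using Nat.le_induction with
  | base =>
      have h0 : 0 < l.length := hkn
      have hget : PySem.List.pyGetD l (0 : Int) [] = l[0] := by
        have := PySem.List.pyGetD_ofNat (xs := l) (n := 0) (d := []) h0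
        simpa using this
      have hRA : RA l 1 = (l[0]'h0).map (fun x => [x]) := by
        rw [RA_succ]
        show stepA l [] 0 = _
        unfold stepA
        rw [hget]
        simp only [beq_self_eq_true, if_true]
        rw [PySem.List.foldl_append_singleton_eq_map (f := fun sl => [sl])]
        simp
      constructor
      · intro x hx
        rw [hRA] at hx
        simp only [List.mem_map] at hx
        obtain ⟨a, _, rfl⟩ := hx
        simp
      · have hfil : ((l[0]'h0).map (fun x => [x])).filter (fun x => x.length == 1) =
            (l[0]'h0).map (fun x => [x]) := by
          apply List.filter_eq_self.mpr
          intro x hx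
          simp only [List.mem_map] at hx
          obtain ⟨a, _, rfl⟩ := hx
          simp
        have htake : l.take 1 = [l[0]'h0] := by
          cases l with
          | nil => simp at h0
          | cons a t => simp
        rw [hRA, hfil, htake]
        simp [stepB, extB, condB_nil, takeWhile_true]
  | succ k hk1 ih =>
      have hkn' : k ≤ l.length := by omega
      have hklt : k < l.length := by omega
      obtain ⟨hlen, hfil⟩ := ih hkn'
      have hget : PySem.List.pyGetD l (k : Int) [] = l[k] := by
        have := PySem.List.pyGetD_ofNat (xs := l) (n := k) (d := []) hklt
        simpa using this
      have hne : ((k : Int) == 0) = false := by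
        simp; omega
      have hstep : RA l (k + 1) = RA l k ++ (RA l k).flatMap
          (fun sr => ((l[k]'hklt).takeWhile
            (fun x => decide (PySem.List.pyGetD sr (-1) 0 < x))).map (fun x => sr ++ [x])) := by
        rw [RA_succ]
        simp only [stepA, hget, hne, Bool.false_eq_true, if_false]
        have : ∀ (tmp acc : List (List Int)),
            tmp.foldl (fun r sr => innerA sr r (l[k]'hklt)) acc =
              acc ++ tmp.flatMap (fun sr => ((l[k]'hklt).takeWhile
                (fun x => decide (PySem.List.pyGetD sr (-1) 0 < x))).map (fun x => sr ++ [x])) := by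
          intro tmp
          induction tmp with
          | nil => intro acc; simp
          | cons a t iht =>
              intro acc
              simp only [List.foldl_cons, List.flatMap_cons, iht, innerA_eq]
              simp [List.append_assoc, List.flatMap]
        exact this (RA l k) (RA l k)
      constructor
      · intro x hx
        rw [hstep] at hx
        rcases List.mem_append.mp hx with h | h
        · have := hlen x h; omega
        · simp only [List.mem_flatMap, List.mem_map] at h
          obtain ⟨sr, hsr, a, _, rfl⟩ := h
          have := hlen sr hsr
          simp; omega
      · rw [hstep, List.filter_append]
        have h1 : (RA l k).filter (fun x => x.length == k + 1) = [] :=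
          List.filter_eq_nil_iff.mpr (by intro x hx; have := hlen x hx; simp; omega)
        rw [h1, List.nil_append]
        rw [filter_flatMap_len _ _ k (by
          intro sr x hx
          simp only [List.mem_map] at hx
          obtain ⟨a, _, rfl⟩ := hx
          simp)]
        rw [hfil]
        -- every element of the level-k layer has length k, hence is nonempty
        have hmem : ∀ sr ∈ (l.take k).foldl stepB [[]], sr.length = k := by
          intro sr hsr
          have := length_foldl_stepB (l.take k) [[]] 0 (by simp) sr hsr
          simpa [List.length_take, Nat.min_eq_left hkn'] using this
        have hcongr : ((l.take k).foldl stepB [[]]).flatMap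
            (fun sr => ((l[k]'hklt).takeWhile
              (fun x => decide (PySem.List.pyGetD sr (-1) 0 < x))).map (fun x => sr ++ [x])) =
            ((l.take k).foldl stepB [[]]).flatMap (extB (l[k]'hklt)) := by
          apply List.flatMap_congr
          intro sr hsr
          have hne2 : sr ≠ [] := by
            intro h; have := hmem sr hsr; rw [h] at this; simp at this; omega
          rw [extB, condB_nonempty sr hne2]
        rw [hcongr]
        have htake : l.take (k + 1) = l.take k ++ [l[k]'hklt] := by
          rw [List.take_add_one]
          simp [List.getElem?_eq_getElem hklt]
        rw [htake, List.foldl_append]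
        rfl

-- ===== VERDICT (by name: the statement is the Claim_ definition above) =====
theorem getValid_spec : Claim_equal_getValid := by
  intro l _
  unfold Spec_getValid getValid getValid_alt
  have hrange : PySem.List.pyRange 0 (l.length : Int) 1 = (List.range l.length).map (fun k => (k : Int)) := by
    rw [PySem.List.pyRange_one]
    simp
    exact List.map_eq_flatMap
  rw [hrange, List.foldl_map]
  by_cases hnil : l = []
  · subst hnil; simp
  · have hlen' : 1 ≤ l.length := List.length_pos_of_ne_nil hnil
    obtain ⟨_, hfil⟩ := invA l l.length hlen' le_rfl
    simp only [hnil, if_false]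
    calc ((List.range l.length).foldl (fun r kk => stepA l r (kk : Int)) []).filter
          (fun x => x.length == l.length)
        = (l.take l.length).foldl stepB [[]] := hfil
      _ = l.foldl stepB [[]] := by rw [List.take_length]
      _ = dfsB [] l := by rw [dfsB_eq]
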